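-- pv_equiv track=rewrite | github.com/levhyun/PythonDatabaseWorkbench | Server/Service.py | CommandDecomposition2
-- ===== SOURCE A (Python) =====
-- def CommandDecomposition2(command):
--     optionList = []
--     temp = ""
--     for i in command:
--         if i != '[' and i != ']':
--             temp += i
--         if i == ']':
--             optionList.append(temp)
--             temp = ""
--     return optionList[0], optionList[1]
-- ===== SOURCE B (Python) =====
-- def CommandDecomposition2(command):
--     parts = command.replace('[', '').split(']')[:-1]
--     return parts[0], parts[1]
-- ===== Notes on version B (the rewrite author's own statement) =====
-- stated objective: idiomatic
-- what changed: Replaces the char-by-char accumulator loop with built-in string parsing: strip '[' via replace, split on ']', drop the trailing segment, and index the first two tokens.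
import Mathlib
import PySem

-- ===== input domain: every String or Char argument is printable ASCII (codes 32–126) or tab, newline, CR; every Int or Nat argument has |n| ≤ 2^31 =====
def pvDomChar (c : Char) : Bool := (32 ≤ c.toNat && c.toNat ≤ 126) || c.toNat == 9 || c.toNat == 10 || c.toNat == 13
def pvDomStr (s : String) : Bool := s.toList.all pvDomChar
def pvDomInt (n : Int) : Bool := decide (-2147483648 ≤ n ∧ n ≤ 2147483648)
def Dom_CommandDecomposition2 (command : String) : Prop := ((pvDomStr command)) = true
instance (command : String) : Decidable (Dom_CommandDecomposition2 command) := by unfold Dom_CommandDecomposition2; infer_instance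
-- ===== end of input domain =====

-- B replaces A's char-by-char accumulator loop with built-in string parsing
-- (replace/split/drop-last/index): idiomatic, same O(n) cost.

-- ===== PORT A =====
-- A's loop state: (optionList, temp), both kept as char lists (Python str concat ↔ List.append).
-- pvStepA is A's loop body: the two sequential ifs of the Python loop.
def pvStepA (st : List (List Char) × List Char) (i : Char) : List (List Char) × List Char :=
  let st := if i ≠ '[' ∧ i ≠ ']' then (st.1, st.2 ++ [i]) else st
  if i = ']' then (st.1 ++ [st.2], ([] : List Char)) else st

def CommandDecomposition2 (command : String) : String × String :=
  let st := command.toList.foldl pvStepA ([], [])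
  -- optionList[0], optionList[1]: Python raises IndexError when absent — excluded by Pre_ below.
  (String.ofList ((PySem.List.pyGet? st.1 0).getD []),
   String.ofList ((PySem.List.pyGet? st.1 1).getD []))

-- ===== PORT B =====
def CommandDecomposition2_alt (command : String) : String × String :=
  let parts := PySem.Chars.splitOn (PySem.Chars.replace command.toList ['['] []) [']']
  let parts := PySem.List.slice parts none (some (-1))
  -- parts[0], parts[1]: Python raises IndexError when absent — excluded by Pre_ below.
  (String.ofList ((PySem.List.pyGet? parts 0).getD []),
   String.ofList ((PySem.List.pyGet? parts 1).getD []))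

-- ===== PRECONDITION & SPEC =====
-- Both A and B raise IndexError exactly when command has fewer than two ']' characters.
def Pre_CommandDecomposition2 (command : String) : Prop := 2 ≤ PySem.Str.count command "]"
instance (command : String) : Decidable (Pre_CommandDecomposition2 command) := by unfold Pre_CommandDecomposition2; infer_instance
def pvWitness_CommandDecomposition2 : String := "sel[abc][def]"
def Spec_CommandDecomposition2 (command : String) (out : String × String) : Prop := out = CommandDecomposition2_alt command
instance (command : String) (out : String × String) : Decidable (Spec_CommandDecomposition2 command out) := by unfold Spec_CommandDecomposition2; infer_instance

-- ===== CLAIM (what is proved, stated in full; the proofs are below) =====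
def Claim_equal_CommandDecomposition2 : Prop := ∀ (command : String), Dom_CommandDecomposition2 command → Pre_CommandDecomposition2 command → Spec_CommandDecomposition2 command (CommandDecomposition2 command)

-- ===== LEMMAS AND PROOFS =====

-- segments of a char list split at ']' (always nonempty)
def pvSegs : List Char → List (List Char)
  | [] => [[]]
  | c :: cs =>
    if c = ']' then [] :: pvSegs cs
    else match pvSegs cs with
      | [] => [[c]]          -- unreachable: pvSegs is never []
      | s :: ss => (c :: s) :: ss

def pvConsHead (pre : List Char) : List (List Char) → List (List Char)
  | [] => [pre]
  | s :: ss => (pre ++ s) :: ss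

lemma pvSegs_ne_nil (cs : List Char) : pvSegs cs ≠ [] := by
  cases cs with
  | nil => simp [pvSegs]
  | cons c cs =>
    simp only [pvSegs]
    split
    · simp
    · cases h : pvSegs cs <;> simp

lemma pvReplace_go_eq (l : List Char) : ∀ (fuel : Nat) (acc : List Char), l.length ≤ fuel →
    PySem.Chars.replace.go ['['] [] fuel l acc = acc.reverse ++ l.filter (· ≠ '[') := by
  induction l with
  | nil => intro fuel acc _; cases fuel <;> simp [PySem.Chars.replace.go]
  | cons c t ih =>
    intro fuel acc h
    cases fuel with
    | zero => simp at h
    | succ f =>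
      simp only [PySem.Chars.replace.go]
      by_cases hc : c = '['
      · subst hc
        rw [if_pos (by simp [List.isPrefixOf])]
        simpa using ih f acc (by simpa using h)
      · rw [if_neg (by simp [List.isPrefixOf]; exact fun e => hc e.symm)]
        rw [ih f (c :: acc) (by simpa using h)]
        simp [hc]

lemma pvSplitOn_go_eq (l : List Char) : ∀ (fuel : Nat) (cur : List Char) (acc : List (List Char)),
    l.length ≤ fuel →
    PySem.Chars.splitOn.go [']'] fuel l cur acc = acc.reverse ++ pvConsHead cur.reverse (pvSegs l) := by
  induction l with
  | nil => intro fuel cur acc _; cases fuel <;> simp [PySem.Chars.splitOn.go, pvSegs, pvConsHead]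
  | cons c t ih =>
    intro fuel cur acc h
    cases fuel with
    | zero => simp at h
    | succ f =>
      simp only [PySem.Chars.splitOn.go]
      by_cases hc : c = ']'
      · subst hc
        rw [if_pos (by simp [List.isPrefixOf])]
        rw [show List.drop ([']'] : List Char).length (']' :: t) = t from rfl]
        rw [ih f [] (cur.reverse :: acc) (by simpa using h)]
        simp [pvSegs, pvConsHead]
        cases ht : pvSegs t with
        | nil => exact absurd ht (pvSegs_ne_nil t)
        | cons s ss => simp
      · rw [if_neg (by simp [List.isPrefixOf]; exact fun e => hc e.symm)]
        rw [ih f (c :: cur) acc (by simpa using h)]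
        simp only [pvSegs]
        rw [if_neg hc]
        cases ht : pvSegs t with
        | nil => exact absurd ht (pvSegs_ne_nil t)
        | cons s ss => simp [pvConsHead]

lemma pvStepA_lb (ol : List (List Char)) (temp : List Char) :
    pvStepA (ol, temp) '[' = (ol, temp) := by simp [pvStepA]

lemma pvStepA_rb (ol : List (List Char)) (temp : List Char) :
    pvStepA (ol, temp) ']' = (ol ++ [temp], []) := by simp [pvStepA]

lemma pvStepA_other (ol : List (List Char)) (temp : List Char) (c : Char)
    (hc1 : c ≠ '[') (hc2 : c ≠ ']') :
    pvStepA (ol, temp) c = (ol, temp ++ [c]) := by simp [pvStepA, hc1, hc2]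

-- A's loop computes the same segments.
lemma pvLoopA_eq (cs : List Char) : ∀ (ol : List (List Char)) (temp : List Char),
    cs.foldl pvStepA (ol, temp)
    = (ol ++ (pvConsHead temp (pvSegs (cs.filter (· ≠ '[')))).dropLast,
       (pvConsHead temp (pvSegs (cs.filter (· ≠ '[')))).getLastD []) := by
  induction cs with
  | nil => intro ol temp; simp [pvSegs, pvConsHead]
  | cons c t ih =>
    intro ol temp
    simp only [List.foldl_cons]
    by_cases hc1 : c = '['
    · subst hc1
      rw [pvStepA_lb, ih ol temp]
      simp
    · by_cases hc2 : c = ']'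
      · subst hc2
        rw [pvStepA_rb, ih (ol ++ [temp]) []]
        have hfil : (']' :: t).filter (· ≠ '[') = ']' :: t.filter (· ≠ '[') := by
          simp
        rw [hfil]
        simp only [pvSegs, if_true]
        cases ht : pvSegs (t.filter (· ≠ '[')) with
        | nil => exact absurd ht (pvSegs_ne_nil _)
        | cons s ss => simp [pvConsHead]
      · rw [pvStepA_other ol temp c hc1 hc2, ih ol (temp ++ [c])]
        have hfil : (c :: t).filter (· ≠ '[') = c :: t.filter (· ≠ '[') := by
          simp [hc1]
        rw [hfil]
        simp only [pvSegs]
        rw [if_neg hc2]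
        cases ht : pvSegs (t.filter (· ≠ '[')) with
        | nil => exact absurd ht (pvSegs_ne_nil _)
        | cons s ss => simp [pvConsHead]

lemma pvTokens_eq (command : String) :
    (command.toList.foldl pvStepA ([], [])).1
    = PySem.List.slice
        (PySem.Chars.splitOn (PySem.Chars.replace command.toList ['['] []) [']'])
        none (some (-1)) := by
  rw [pvLoopA_eq]
  have hrep : PySem.Chars.replace command.toList ['['] [] = command.toList.filter (· ≠ '[') := by
    simp only [PySem.Chars.replace, List.isEmpty_cons, Bool.false_eq_true, if_false]
    exact pvReplace_go_eq command.toList command.toList.length [] le_rfl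
  rw [hrep]
  have hsplit : PySem.Chars.splitOn (command.toList.filter (· ≠ '[')) [']']
      = pvSegs (command.toList.filter (· ≠ '[')) := by
    simp only [PySem.Chars.splitOn]
    rw [pvSplitOn_go_eq _ _ [] [] (by omega)]
    cases ht : pvSegs (command.toList.filter (· ≠ '[')) with
    | nil => exact absurd ht (pvSegs_ne_nil _)
    | cons s ss => simp [pvConsHead]
  rw [hsplit, PySem.List.slice_to_neg_one]
  cases ht : pvSegs (command.toList.filter (· ≠ '[')) with
  | nil => exact absurd ht (pvSegs_ne_nil _)
  | cons s ss => simp [pvConsHead]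

-- ===== VERDICT (by name: the statement is the Claim_ definition above) =====
theorem CommandDecomposition2_spec : Claim_equal_CommandDecomposition2 := by
  intro command _ _
  show _ = _
  unfold CommandDecomposition2 CommandDecomposition2_alt
  dsimp only
  rw [pvTokens_eq]
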